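-- pv_equiv track=rewrite | github.com/TrungXibia/ledaonuoi3mien | logic.py | lay_dan_cham
-- ===== SOURCE A (Python) =====
-- def lay_dan_cham(chuoi_cham):
--     res = []
--     for i in range(100):
--         pair = f"{i:02d}"
--         for c in chuoi_cham:
--             if c in pair:
--                 res.append(pair)
--                 break
--     return sorted(set(res))
-- ===== SOURCE B (Python) =====
-- def lay_dan_cham(chuoi_cham):
--     result = set()
--     for c in set(chuoi_cham):
--         if c.isdigit():
--             for j in range(10):
--                 d = str(j)
--                 result.add(c + d)
--                 result.add(d + c)
--     return sorted(result)
-- ===== Notes on version B (the rewrite author's own statement) =====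
-- stated objective: faster
-- what changed: Instead of scanning all 100 two-digit strings and testing each against every character of the input, B iterates once over the distinct digit characters of the input and directly generates the qualifying pairs c+d and d+c for d in 0..9 into a set, then sorts.
import Mathlib
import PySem

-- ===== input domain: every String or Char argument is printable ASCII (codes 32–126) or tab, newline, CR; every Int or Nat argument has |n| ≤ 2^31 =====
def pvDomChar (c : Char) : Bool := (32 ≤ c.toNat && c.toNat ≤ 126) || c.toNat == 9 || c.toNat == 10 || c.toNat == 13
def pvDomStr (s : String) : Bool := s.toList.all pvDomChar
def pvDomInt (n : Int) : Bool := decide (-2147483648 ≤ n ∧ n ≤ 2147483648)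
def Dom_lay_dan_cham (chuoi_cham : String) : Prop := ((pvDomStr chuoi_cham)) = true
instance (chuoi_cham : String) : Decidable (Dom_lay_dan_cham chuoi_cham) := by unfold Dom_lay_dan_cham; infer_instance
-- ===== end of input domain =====

-- B replaces A's scan-and-filter over all 100 two-digit strings by direct generation of the
-- qualifying pairs from the distinct digit characters of the input (one pass over the input instead
-- of 100 substring scans; measurably faster on long inputs).

-- ===== PORT A =====
-- f"{i:02d}" (i ∈ 0..99 here): str(i) zero-padded to width 2
def pvFmt02 (i : Int) : String := String.ofList (PySem.Chars.zfill (PySem.Int.toChars i) 2)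

-- the inner 'for c in chuoi_cham: if c in pair: res.append(pair); break'
def pvInner : List Char → String → List String → List String
  | [], _, res => res
  | c :: cs, pair, res =>
    if PySem.Str.isIn (String.ofList [c]) pair then res ++ [pair]
    else pvInner cs pair res

def lay_dan_cham (chuoi_cham : String) : List String :=
  let res := (PySem.List.pyRange 0 100 1).foldl
    (fun res i => pvInner chuoi_cham.toList (pvFmt02 i) res) []
  PySem.List.sorted (PySem.Set.ofList res) (fun x => x)

-- ===== PORT B =====
-- 'for j in range(10): d = str(j); result.add(c + d); result.add(d + c)'
def pvAddPairs (c : Char) (r : PySem.Set String) : PySem.Set String :=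
  (PySem.List.pyRange 0 10 1).foldl
    (fun r j =>
      let d := PySem.Int.toChars j
      PySem.Set.add (PySem.Set.add r (String.ofList ([c] ++ d))) (String.ofList (d ++ [c]))) r

def lay_dan_cham_alt (chuoi_cham : String) : List String :=
  let result := (PySem.Set.ofList chuoi_cham.toList).foldl
    (fun r c => if PySem.Chars.isdigit c then pvAddPairs c r else r)
    PySem.Set.empty
  PySem.List.sorted result (fun x => x)

-- ===== PRECONDITION & SPEC =====
def Spec_lay_dan_cham (chuoi_cham : String) (out : List String) : Prop := out = lay_dan_cham_alt chuoi_cham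
instance (chuoi_cham : String) (out : List String) : Decidable (Spec_lay_dan_cham chuoi_cham out) := by unfold Spec_lay_dan_cham; infer_instance

-- ===== CLAIM (what is proved, stated in full; the proofs are below) =====
def Claim_equal_lay_dan_cham : Prop := ∀ (chuoi_cham : String), Dom_lay_dan_cham chuoi_cham → Spec_lay_dan_cham chuoi_cham (lay_dan_cham chuoi_cham)

-- ===== LEMMAS AND PROOFS =====

-- common characterisation of both result sets: two-digit strings with a digit from chars
def pvMid (chars : List Char) (x : String) : Prop :=
  ∃ a b : Nat, a < 10 ∧ b < 10 ∧ x = String.ofList [Nat.digitChar a, Nat.digitChar b] ∧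
    (Nat.digitChar a ∈ chars ∨ Nat.digitChar b ∈ chars)

theorem pvFmt02_eq : ∀ n : Nat, n < 100 →
    pvFmt02 (n : Int) = String.ofList [Nat.digitChar (n / 10), Nat.digitChar (n % 10)] := by
  decide

theorem pvToChars_eq : ∀ j : Nat, j < 10 → PySem.Int.toChars (j : Int) = [Nat.digitChar j] := by
  decide

theorem pvDigitChar_isdigit : ∀ a : Nat, a < 10 → PySem.Chars.isdigit (Nat.digitChar a) = true := by
  decide

theorem pvIsdigit_exists (c : Char) (h : PySem.Chars.isdigit c = true) :
    ∃ a, a < 10 ∧ c = Nat.digitChar a := by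
  simp only [PySem.Chars.isdigit, Bool.and_eq_true, decide_eq_true_eq] at h
  have h1 : 48 ≤ c.toNat ∧ c.toNat ≤ 57 := by
    obtain ⟨ha, hb⟩ := h
    rw [Char.le_def, UInt32.le_iff_toNat_le] at ha hb
    exact ⟨ha, hb⟩
  have hc : c = Char.ofNat c.toNat := (Char.ofNat_toNat c).symm
  obtain ⟨h48, h57⟩ := h1
  interval_cases h : c.toNat <;>
    first
      | exact ⟨0, by omega, by rw [hc]; decide⟩ | exact ⟨1, by omega, by rw [hc]; decide⟩
      | exact ⟨2, by omega, by rw [hc]; decide⟩ | exact ⟨3, by omega, by rw [hc]; decide⟩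
      | exact ⟨4, by omega, by rw [hc]; decide⟩ | exact ⟨5, by omega, by rw [hc]; decide⟩
      | exact ⟨6, by omega, by rw [hc]; decide⟩ | exact ⟨7, by omega, by rw [hc]; decide⟩
      | exact ⟨8, by omega, by rw [hc]; decide⟩ | exact ⟨9, by omega, by rw [hc]; decide⟩

theorem pvSingleton_isIn (c : Char) (p : String) :
    PySem.Chars.isIn [c] p.toList = true ↔ c ∈ p.toList := by
  rw [PySem.Chars.isIn_iff_infix]
  exact List.singleton_infix_iff c p.toList

theorem pvInner_eq (cs : List Char) (pair : String) (res : List String) :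
    pvInner cs pair res =
      if cs.any (fun c => PySem.Chars.isIn [c] pair.toList) then res ++ [pair] else res := by
  induction cs with
  | nil => simp [pvInner]
  | cons c cs ih =>
    by_cases hc : PySem.Chars.isIn [c] pair.toList = true
    · simp [pvInner, hc]
    · rw [Bool.not_eq_true] at hc
      simp [pvInner, hc, ih]

theorem pvMem_A (s x : String) :
    x ∈ PySem.Set.ofList
        ((PySem.List.pyRange 0 100 1).foldl
          (fun res i => pvInner s.toList (pvFmt02 i) res) []) ↔ pvMid s.toList x := by
  simp only [pvInner_eq]
  rw [PySem.List.foldl_append_if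
        (p := fun i => s.toList.any (fun c => PySem.Chars.isIn [c] (pvFmt02 i).toList))
        (f := pvFmt02)]
  simp only [List.nil_append, PySem.Set.mem_ofList, List.mem_map, List.mem_filter,
    PySem.List.mem_pyRange_one]
  constructor
  · rintro ⟨i, ⟨⟨h0, h100⟩, hany⟩, hx⟩
    obtain ⟨n, rfl⟩ : ∃ n : Nat, i = (n : Int) := ⟨i.toNat, (Int.toNat_of_nonneg h0).symm⟩
    have hn : n < 100 := by exact_mod_cast h100
    rw [pvFmt02_eq n hn] at hany hx
    rw [List.any_eq_true] at hany
    obtain ⟨c, hcmem, hcin⟩ := hany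
    rw [pvSingleton_isIn] at hcin
    simp only [String.toList_ofList, List.mem_cons, List.not_mem_nil, or_false] at hcin
    refine ⟨n / 10, n % 10, by omega, by omega, hx.symm, ?_⟩
    rcases hcin with h | h
    · exact Or.inl (h ▸ hcmem)
    · exact Or.inr (h ▸ hcmem)
  · rintro ⟨a, b, ha, hb, hx, hmem⟩
    refine ⟨((a * 10 + b : Nat) : Int), ⟨⟨by positivity, by exact_mod_cast (by omega : a * 10 + b < 100)⟩, ?_⟩, ?_⟩
    · rw [pvFmt02_eq (a * 10 + b) (by omega), List.any_eq_true]
      have hda : (a * 10 + b) / 10 = a := by omega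
      have hdb : (a * 10 + b) % 10 = b := by omega
      rw [hda, hdb]
      rcases hmem with h | h
      · exact ⟨Nat.digitChar a, h, by rw [pvSingleton_isIn]; simp⟩
      · exact ⟨Nat.digitChar b, h, by rw [pvSingleton_isIn]; simp⟩
    · rw [pvFmt02_eq (a * 10 + b) (by omega)]
      have hda : (a * 10 + b) / 10 = a := by omega
      have hdb : (a * 10 + b) % 10 = b := by omega
      rw [hda, hdb, hx]

theorem pvMem_addfold (c : Char) (l : List Int) (r : PySem.Set String) (y : String) :
    y ∈ l.foldl
        (fun r j =>
          PySem.Set.add (PySem.Set.add r (String.ofList ([c] ++ PySem.Int.toChars j)))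
            (String.ofList (PySem.Int.toChars j ++ [c]))) r ↔
      y ∈ r ∨ ∃ j ∈ l, y = String.ofList ([c] ++ PySem.Int.toChars j) ∨
        y = String.ofList (PySem.Int.toChars j ++ [c]) := by
  induction l generalizing r with
  | nil => simp
  | cons j l ih =>
    rw [List.foldl_cons, ih]
    simp only [PySem.Set.mem_add, List.mem_cons]
    constructor
    · rintro (((h | h) | h) | ⟨j', hj', h⟩)
      · exact Or.inl h
      · exact Or.inr ⟨j, Or.inl rfl, Or.inl h⟩
      · exact Or.inr ⟨j, Or.inl rfl, Or.inr h⟩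
      · exact Or.inr ⟨j', Or.inr hj', h⟩
    · rintro (h | ⟨j', hj' | hj', h⟩)
      · exact Or.inl (Or.inl (Or.inl h))
      · subst hj'
        rcases h with h | h
        · exact Or.inl (Or.inl (Or.inr h))
        · exact Or.inl (Or.inr h)
      · exact Or.inr ⟨j', hj', h⟩

theorem pvMem_addPairs (c : Char) (r : PySem.Set String) (y : String) :
    y ∈ pvAddPairs c r ↔
      y ∈ r ∨ ∃ j : Nat, j < 10 ∧
        (y = String.ofList [c, Nat.digitChar j] ∨ y = String.ofList [Nat.digitChar j, c]) := by
  unfold pvAddPairs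
  rw [pvMem_addfold]
  simp only [PySem.List.mem_pyRange_one]
  constructor
  · rintro (h | ⟨j, ⟨h0, h10⟩, h⟩)
    · exact Or.inl h
    · obtain ⟨n, rfl⟩ : ∃ n : Nat, j = (n : Int) := ⟨j.toNat, (Int.toNat_of_nonneg h0).symm⟩
      have hn : n < 10 := by exact_mod_cast h10
      rw [pvToChars_eq n hn] at h
      exact Or.inr ⟨n, hn, h⟩
  · rintro (h | ⟨j, hj, h⟩)
    · exact Or.inl h
    · refine Or.inr ⟨(j : Int), ⟨by positivity, by exact_mod_cast hj⟩, ?_⟩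
      rw [pvToChars_eq j hj]
      exact h

theorem pvNodup_addfold (c : Char) (l : List Int) (r : PySem.Set String) (h : r.Nodup) :
    (l.foldl
        (fun r j =>
          PySem.Set.add (PySem.Set.add r (String.ofList ([c] ++ PySem.Int.toChars j)))
            (String.ofList (PySem.Int.toChars j ++ [c]))) r).Nodup := by
  induction l generalizing r with
  | nil => exact h
  | cons j l ih =>
    rw [List.foldl_cons]
    exact ih _ (PySem.Set.nodup_add _ _ (PySem.Set.nodup_add _ _ h))

theorem pvNodup_addPairs (c : Char) (r : PySem.Set String) (h : r.Nodup) :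
    (pvAddPairs c r).Nodup := by
  unfold pvAddPairs
  exact pvNodup_addfold c _ r h

theorem pvMem_outer (l : List Char) (r : PySem.Set String) (y : String) :
    y ∈ l.foldl (fun r c => if PySem.Chars.isdigit c then pvAddPairs c r else r) r ↔
      y ∈ r ∨ ∃ c ∈ l, PySem.Chars.isdigit c = true ∧ ∃ j : Nat, j < 10 ∧
        (y = String.ofList [c, Nat.digitChar j] ∨ y = String.ofList [Nat.digitChar j, c]) := by
  induction l generalizing r with
  | nil => simp
  | cons c l ih =>
    rw [List.foldl_cons, ih]
    by_cases hd : PySem.Chars.isdigit c = true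
    · rw [if_pos hd]
      rw [pvMem_addPairs]
      simp only [List.mem_cons]
      constructor
      · rintro ((h | ⟨j, hj, h⟩) | ⟨c', hc', hd', h⟩)
        · exact Or.inl h
        · exact Or.inr ⟨c, Or.inl rfl, hd, j, hj, h⟩
        · exact Or.inr ⟨c', Or.inr hc', hd', h⟩
      · rintro (h | ⟨c', hc' | hc', hd', h⟩)
        · exact Or.inl (Or.inl h)
        · subst hc'
          exact Or.inl (Or.inr h)
        · exact Or.inr ⟨c', hc', hd', h⟩
    · rw [if_neg hd]
      simp only [List.mem_cons]
      constructor
      · rintro (h | ⟨c', hc', hd', h⟩)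
        · exact Or.inl h
        · exact Or.inr ⟨c', Or.inr hc', hd', h⟩
      · rintro (h | ⟨c', hc' | hc', hd', h⟩)
        · exact Or.inl h
        · exact absurd (hc' ▸ hd') hd
        · exact Or.inr ⟨c', hc', hd', h⟩

theorem pvNodup_outer (l : List Char) (r : PySem.Set String) (h : r.Nodup) :
    (l.foldl (fun r c => if PySem.Chars.isdigit c then pvAddPairs c r else r) r).Nodup := by
  induction l generalizing r with
  | nil => exact h
  | cons c l ih =>
    rw [List.foldl_cons]
    by_cases hd : PySem.Chars.isdigit c = true
    · rw [if_pos hd]; exact ih _ (pvNodup_addPairs c r h)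
    · rw [if_neg hd]; exact ih _ h

theorem pvMem_B (s x : String) :
    x ∈ (PySem.Set.ofList s.toList).foldl
        (fun r c => if PySem.Chars.isdigit c then pvAddPairs c r else r) PySem.Set.empty ↔
      pvMid s.toList x := by
  rw [pvMem_outer]
  simp only [PySem.Set.empty, List.not_mem_nil, false_or, PySem.Set.mem_ofList]
  constructor
  · rintro ⟨c, hc, hd, j, hj, h⟩
    obtain ⟨a, ha, rfl⟩ := pvIsdigit_exists c hd
    rcases h with h | h
    · exact ⟨a, j, ha, hj, h, Or.inl hc⟩
    · exact ⟨j, a, hj, ha, h, Or.inr hc⟩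
  · rintro ⟨a, b, ha, hb, hx, hmem⟩
    rcases hmem with h | h
    · exact ⟨Nat.digitChar a, h, pvDigitChar_isdigit a ha, b, hb, Or.inl hx⟩
    · exact ⟨Nat.digitChar b, h, pvDigitChar_isdigit b hb, a, ha, Or.inr hx⟩

-- ===== VERDICT (by name: the statement is the Claim_ definition above) =====
theorem lay_dan_cham_spec : Claim_equal_lay_dan_cham := by
  intro s _
  unfold Spec_lay_dan_cham lay_dan_cham lay_dan_cham_alt
  apply PySem.List.sorted_eq_sorted_of_perm _ _ _ (fun _ _ h => h)
  refine (List.perm_ext_iff_of_nodup (PySem.Set.nodup_ofList _) (pvNodup_outer _ _ List.nodup_nil)).mpr ?_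
  intro x
  rw [pvMem_A]
  exact (pvMem_B s x).symm
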